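-- pv_equiv track=rewrite | github.com/shiluanzzz/leetcode_backup | leetcode/editor/cn/777.py | solve
-- ===== SOURCE A (Python) =====
-- def solve(start,end):
--     # XL -> LX
--     # RX -> XR
--     # start = "RXXLRXRXL", end = "XRLXXRRLX"
--     if len(start) != len(end):
--         return False
--     n=0
--     rs,re=0,0
--     ls,le=0,0
--     while n<len(start):
--         if start[n]=="X":
--             n+=1
--             continue
--         if start[n]=="R":
--             rs=find_next(rs,start,"R")
--             re=find_next(re,end,"R")
--             # R可能被调换到右边 所以start的index》end的
--             if rs!="F" and re!="F" and rs<=re: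
--                 n+=1
--                 continue
--             else:
--                 return False
--         if start[n] == "L":
--             ls = find_next(ls, start,"L")
--             le = find_next(le, end,"L")
--             # L可能被调换到右边 所以start的index》end的
--             if ls!="F" and le!="F" and ls >= le:
--                 n += 1
--                 continue
--             else:
--                 return False
--     return True
--
-- def find_next(char,str,flag):
--     while char < len(str):
--         if str[char] == flag:
--             return char
--         else:
--             char += 1
--     return "F"
-- ===== SOURCE B (Python) =====
-- def solve(start, end):
--     if len(start) != len(end):
--         return False
--     rs, re = start.find('R'), end.find('R')
--     if rs != -1 and (re == -1 or rs > re):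
--         return False
--     ls, le = start.find('L'), end.find('L')
--     if ls != -1 and (le == -1 or ls < le):
--         return False
--     return True
-- ===== Notes on version B (the rewrite author's own statement) =====
-- stated objective: simpler
-- what changed: A's while loop with four sticky find_next pointers is replaced by a loop-free check: since only the first occurrence of 'R' and of 'L' ever matters in A, B compares str.find('R')/str.find('L') of start and end directly.
-- outside the precondition, e.g. on solve('RZ', 'XX'): A returns False, B returns False
import Mathlib
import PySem

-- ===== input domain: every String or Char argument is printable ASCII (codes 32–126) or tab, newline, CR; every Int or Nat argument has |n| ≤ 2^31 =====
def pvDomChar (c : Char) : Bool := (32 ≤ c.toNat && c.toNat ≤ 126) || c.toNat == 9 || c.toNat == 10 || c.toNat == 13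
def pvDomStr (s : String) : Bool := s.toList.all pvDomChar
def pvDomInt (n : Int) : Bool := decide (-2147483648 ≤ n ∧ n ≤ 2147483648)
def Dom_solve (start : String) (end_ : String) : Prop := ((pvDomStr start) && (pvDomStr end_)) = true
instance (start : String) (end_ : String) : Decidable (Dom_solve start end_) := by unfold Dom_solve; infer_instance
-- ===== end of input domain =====

-- B replaces A's sticky-pointer while loop by a loop-free comparison of the first occurrences of 'R' and 'L' via str.find (objective: simpler).

-- ===== PORT A =====
-- find_next(char, str, flag): scan forward from index `char`; Python's "F" (no match) is ported as `none`.
def findNext (char : Nat) (s : List Char) (flag : Char) : Option Nat :=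
  if h : char < s.length then
    if s[char] = flag then some char else findNext (char + 1) s flag
  else none
termination_by s.length - char

-- the while loop of solve; state n, rs, re, ls, le (when find_next returns "F" Python returns
-- False at once, so the state that survives an iteration is always an index, a Nat).
-- On a character outside {'X','R','L'} Python loops forever (n is never incremented); those
-- inputs are excluded by Pre_solve and this port returns false there.
def solveLoop (s e : List Char) (n rs re ls le : Nat) : Bool :=
  if h : n < s.length then
    if s[n] = 'X' then solveLoop s e (n + 1) rs re ls le
    else if s[n] = 'R' then
      match findNext rs s 'R', findNext re e 'R' with
      | some rs', some re' =>
          if rs' ≤ re' then solveLoop s e (n + 1) rs' re' ls le else false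
      | _, _ => false
    else if s[n] = 'L' then
      match findNext ls s 'L', findNext le e 'L' with
      | some ls', some le' =>
          if le' ≤ ls' then solveLoop s e (n + 1) rs re ls' le' else false
      | _, _ => false
    else false  -- unreachable under Pre_solve (Python never returns here: the loop diverges)
  else true
termination_by s.length - n

def solve (start : String) (end_ : String) : Bool :=
  if start.toList.length ≠ end_.toList.length then false
  else solveLoop start.toList end_.toList 0 0 0 0 0

-- ===== PORT B =====
def solve_alt (start : String) (end_ : String) : Bool :=
  if start.toList.length ≠ end_.toList.length then false
  else
    let rs := PySem.Str.find start "R"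
    let re := PySem.Str.find end_ "R"
    if rs ≠ -1 ∧ (re = -1 ∨ rs > re) then false
    else
      let ls := PySem.Str.find start "L"
      let le := PySem.Str.find end_ "L"
      if ls ≠ -1 ∧ (le = -1 ∨ ls < le) then false
      else true

-- ===== PRECONDITION & SPEC =====
-- Pre_ excludes equal-length inputs whose `start` contains a character outside {'X','R','L'}:
-- on such an input Python A either loops forever (the while loop never advances past that
-- character) or, when an earlier R/L check fails first, returns False exactly as B does.
def Pre_solve (start : String) (end_ : String) : Prop :=
  start.toList.length = end_.toList.length →
    start.toList.all (fun c => c == 'X' || c == 'R' || c == 'L') = true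
instance (start : String) (end_ : String) : Decidable (Pre_solve start end_) := by
  unfold Pre_solve; infer_instance

def pvWitness_solve : String × String := ("RXXLRXRXL", "XRLXXRRLX")

def Spec_solve (start : String) (end_ : String) (out : Bool) : Prop := out = solve_alt start end_
instance (start : String) (end_ : String) (out : Bool) : Decidable (Spec_solve start end_ out) := by unfold Spec_solve; infer_instance

-- ===== CLAIM (what is proved, stated in full; the proofs are below) =====
def Claim_equal_solve : Prop := ∀ (start : String) (end_ : String), Dom_solve start end_ → Pre_solve start end_ → Spec_solve start end_ (solve start end_)

-- ===== LEMMAS AND PROOFS =====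

-- closed forms of the two sticky checks (first 'R' of start vs first 'R' of end, etc.)
def rOK (s e : List Char) : Bool :=
  match findNext 0 s 'R', findNext 0 e 'R' with
  | some a, some b => a ≤ b
  | none, _ => true
  | some _, none => false

def lOK (s e : List Char) : Bool :=
  match findNext 0 s 'L', findNext 0 e 'L' with
  | some a, some b => b ≤ a
  | none, _ => true
  | some _, none => false

theorem findNext_some (c : Nat) (s : List Char) (f : Char) (i : Nat)
    (h : findNext c s f = some i) :
    c ≤ i ∧ (∃ hi : i < s.length, s[i] = f) ∧ ∀ j (hj : j < s.length), c ≤ j → j < i → s[j] ≠ f := by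
  revert h
  fun_induction findNext c s f with
  | case1 c h1 h2 =>
      intro h; simp only [Option.some.injEq] at h; subst h
      exact ⟨le_refl _, ⟨h1, h2⟩, fun j hj hcj hji => by omega⟩
  | case2 c h1 h2 ih =>
      intro h
      obtain ⟨h3, h4, h5⟩ := ih h
      refine ⟨by omega, h4, fun j hj hcj hji => ?_⟩
      rcases Nat.eq_or_lt_of_le hcj with rfl | hlt
      · exact h2
      · exact h5 j hj hlt hji
  | case3 c h1 => intro h; simp at h

theorem findNext_none (c : Nat) (s : List Char) (f : Char)
    (h : findNext c s f = none) :
    ∀ j (hj : j < s.length), c ≤ j → s[j] ≠ f := by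
  revert h
  fun_induction findNext c s f with
  | case1 c h1 h2 => intro h; simp at h
  | case2 c h1 h2 ih =>
      intro h j hj hcj
      rcases Nat.eq_or_lt_of_le hcj with rfl | hlt
      · exact h2
      · exact ih h j hj hlt
  | case3 c h1 => intro h j hj hcj; omega

theorem findNext_self (s : List Char) (f : Char) (i : Nat)
    (hi : i < s.length) (hf : s[i] = f) : findNext i s f = some i := by
  unfold findNext
  simp [hi, hf]

theorem loop_eq (s e : List Char)
    (hc : ∀ c ∈ s, c = 'X' ∨ c = 'R' ∨ c = 'L')
    (n rs re ls le : Nat)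
    (hrs : findNext rs s 'R' = findNext 0 s 'R') (hre : findNext re e 'R' = findNext 0 e 'R')
    (hls : findNext ls s 'L' = findNext 0 s 'L') (hle : findNext le e 'L' = findNext 0 e 'L') :
    solveLoop s e n rs re ls le =
      ((!(s.drop n).contains 'R' || rOK s e) && (!(s.drop n).contains 'L' || lOK s e)) := by
  revert hrs hre hls hle
  fun_induction solveLoop s e n rs re ls le with
  | case1 n rs re ls le h hX ih =>
      intro hrs hre hls hle
      rw [ih hrs hre hls hle, List.drop_eq_getElem_cons h, hX]
      simp
  | case2 n rs re ls le h hX hR rs' re' hfe hfr hle' ih =>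
      intro hrs hre hls hle
      have hfr0 : findNext 0 s 'R' = some rs' := hrs ▸ hfr
      have hfe0 : findNext 0 e 'R' = some re' := hre ▸ hfe
      obtain ⟨-, ⟨hrs'lt, hrs'get⟩, -⟩ := findNext_some 0 s 'R' rs' hfr0
      obtain ⟨-, ⟨hre'lt, hre'get⟩, -⟩ := findNext_some 0 e 'R' re' hfe0
      rw [ih (by rw [findNext_self s 'R' rs' hrs'lt hrs'get, hfr0])
             (by rw [findNext_self e 'R' re' hre'lt hre'get, hfe0]) hls hle]
      have hrok : rOK s e = true := by simp [rOK, hfr0, hfe0, hle']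
      rw [List.drop_eq_getElem_cons h, hR]
      simp [hrok]
  | case3 n rs re ls le h hX hR rs' re' hfe hfr hle' =>
      intro hrs hre hls hle
      have hfr0 : findNext 0 s 'R' = some rs' := hrs ▸ hfr
      have hfe0 : findNext 0 e 'R' = some re' := hre ▸ hfe
      have hrok : rOK s e = false := by simp [rOK, hfr0, hfe0]; omega
      rw [List.drop_eq_getElem_cons h, hR]
      simp [hrok]
  | case4 n rs re ls le h hX hR hmatch =>
      intro hrs hre hls hle
      -- one of the two find_next calls returned none
      rw [List.drop_eq_getElem_cons h, hR]
      rcases hfr : findNext rs s 'R' with _ | rs'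
      · exfalso
        exact findNext_none 0 s 'R' (hrs ▸ hfr) n h (Nat.zero_le _) hR
      · rcases hfe : findNext re e 'R' with _ | re'
        · have hrok : rOK s e = false := by simp [rOK, hrs ▸ hfr, hre ▸ hfe]
          simp [hrok]
        · exact (hmatch rs' re' hfr hfe).elim
  | case5 n rs re ls le h hX hR hL ls' le' hfe hfs hge ih =>
      intro hrs hre hls hle
      have hfs0 : findNext 0 s 'L' = some ls' := hls ▸ hfs
      have hfe0 : findNext 0 e 'L' = some le' := hle ▸ hfe
      obtain ⟨-, ⟨hls'lt, hls'get⟩, -⟩ := findNext_some 0 s 'L' ls' hfs0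
      obtain ⟨-, ⟨hle'lt, hle'get⟩, -⟩ := findNext_some 0 e 'L' le' hfe0
      rw [ih hrs hre (by rw [findNext_self s 'L' ls' hls'lt hls'get, hfs0])
             (by rw [findNext_self e 'L' le' hle'lt hle'get, hfe0])]
      have hlok : lOK s e = true := by simp [lOK, hfs0, hfe0, hge]
      rw [List.drop_eq_getElem_cons h, hL]
      simp [hlok]
  | case6 n rs re ls le h hX hR hL ls' le' hfe hfs hge =>
      intro hrs hre hls hle
      have hfs0 : findNext 0 s 'L' = some ls' := hls ▸ hfs
      have hfe0 : findNext 0 e 'L' = some le' := hle ▸ hfe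
      have hlok : lOK s e = false := by simp [lOK, hfs0, hfe0]; omega
      rw [List.drop_eq_getElem_cons h, hL]
      simp [hlok]
  | case7 n rs re ls le h hX hR hL hmatch =>
      intro hrs hre hls hle
      rw [List.drop_eq_getElem_cons h, hL]
      rcases hfs : findNext ls s 'L' with _ | ls'
      · exfalso
        exact findNext_none 0 s 'L' (hls ▸ hfs) n h (Nat.zero_le _) hL
      · rcases hfe : findNext le e 'L' with _ | le'
        · have hlok : lOK s e = false := by simp [lOK, hls ▸ hfs, hle ▸ hfe]
          simp [hlok]
        · exact (hmatch ls' le' hfs hfe).elim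
  | case8 n rs re ls le h hX hR hL =>
      intro hrs hre hls hle
      exact absurd (hc s[n] (List.getElem_mem h)) (by simp [hX, hR, hL])
  | case9 n rs re ls le h =>
      intro hrs hre hls hle
      rw [List.drop_eq_nil_iff.mpr (by omega)]
      simp
-- character positions of the singleton pattern used by str.find
theorem singleton_prefix_drop (c : Char) (s : List Char) (j : Nat) :
    [c] <+: s.drop j ↔ ∃ hj : j < s.length, s[j] = c := by
  constructor
  · rintro ⟨t, ht⟩
    have hlen : j < s.length := by
      have := congrArg List.length ht
      simp [List.length_drop] at this
      omega
    refine ⟨hlen, ?_⟩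
    have h0 : s.drop j = c :: t := ht.symm
    have h1 := List.drop_eq_getElem_cons hlen
    rw [h0] at h1
    exact (List.cons.injEq _ _ _ _ ▸ h1).1.symm
  · rintro ⟨hj, hc⟩
    exact ⟨s.drop (j+1), by rw [List.drop_eq_getElem_cons hj, hc]; rfl⟩

theorem find_singleton (s : List Char) (c : Char) :
    PySem.Chars.find s [c] =
      match findNext 0 s c with
      | some i => (i : Int)
      | none => -1 := by
  cases hfn : findNext 0 s c with
  | none =>
      have hmem : c ∉ s := by
        intro hm
        obtain ⟨i, hi, hig⟩ := List.mem_iff_getElem.mp hm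
        exact findNext_none 0 s c hfn i hi (Nat.zero_le _) hig
      simp [PySem.Chars.find_eq_neg_one_iff, List.singleton_infix_iff, hmem]
  | some i =>
      obtain ⟨-, ⟨hi, hget⟩, hmin⟩ := findNext_some 0 s c i hfn
      have hne : PySem.Chars.find s [c] ≠ -1 := by
        rw [Ne, PySem.Chars.find_eq_neg_one_iff, List.singleton_infix_iff]
        simp
        exact List.mem_iff_getElem.mpr ⟨i, hi, hget⟩
      have hspec := PySem.Chars.findFrom_natCast_spec s [c] 0 (Nat.zero_le _)
        (by simp only [Nat.cast_zero, PySem.Chars.findFrom_zero]; exact hne)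
      simp only [Nat.cast_zero, PySem.Chars.findFrom_zero] at hspec
      obtain ⟨hge, hpre, hminf⟩ := hspec
      set t := (PySem.Chars.find s [c]).toNat with ht
      obtain ⟨htlt, htget⟩ := (singleton_prefix_drop c s t).mp hpre
      have hit : i = t := by
        by_contra hne'
        rcases Nat.lt_or_ge i t with hlt | hge'
        · exact absurd ((singleton_prefix_drop c s i).mpr ⟨hi, hget⟩)
            (hminf i (by omega) (by omega))
        · exact hmin t htlt (Nat.zero_le _) (by omega) htget
      simp only []
      omega

theorem contains_findNext (s : List Char) (c : Char) :
    s.contains c = (findNext 0 s c).isSome := by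
  cases hfn : findNext 0 s c with
  | none =>
      have hm : c ∉ s := fun hm => by
        obtain ⟨i, hi, hig⟩ := List.mem_iff_getElem.mp hm
        exact findNext_none 0 s c hfn i hi (Nat.zero_le _) hig
      simp [hm]
  | some i =>
      obtain ⟨-, ⟨hi, hget⟩, -⟩ := findNext_some 0 s c i hfn
      simp [List.mem_iff_getElem.mpr ⟨i, hi, hget⟩]

theorem solve_closed (start end_ : String) (hp : Pre_solve start end_) :
    solve start end_ =
      if start.toList.length ≠ end_.toList.length then false
      else ((!start.toList.contains 'R' || rOK start.toList end_.toList) &&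
            (!start.toList.contains 'L' || lOK start.toList end_.toList)) := by
  unfold solve
  by_cases hlen : start.toList.length = end_.toList.length
  · have hc : ∀ c ∈ start.toList, c = 'X' ∨ c = 'R' ∨ c = 'L' := by
      intro c hmem
      have h2 := List.all_eq_true.mp (hp hlen) c hmem
      simp at h2
      tauto
    rw [if_neg (by omega), if_neg (by omega),
        loop_eq start.toList end_.toList hc 0 0 0 0 0 rfl rfl rfl rfl]
    simp
  · rw [if_pos hlen, if_pos hlen]

-- ===== VERDICT (by name: the statement is the Claim_ definition above) =====
theorem solve_spec : Claim_equal_solve := by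
  intro start end_ _hd hp
  unfold Spec_solve solve_alt
  rw [solve_closed start end_ hp]
  by_cases hlen : start.toList.length = end_.toList.length
  · rw [if_neg (by omega), if_neg (by omega)]
    have e1 : ("R" : String).toList = ['R'] := rfl
    have e2 : ("L" : String).toList = ['L'] := rfl
    simp only [PySem.Str.find_eq, e1, e2, find_singleton, contains_findNext, rOK, lOK]
    rcases hA : findNext 0 start.toList 'R' with _ | a <;>
      rcases hB : findNext 0 end_.toList 'R' with _ | b <;>
        rcases hC : findNext 0 start.toList 'L' with _ | cc <;>
          rcases hD : findNext 0 end_.toList 'L' with _ | d <;>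
            simp only [Option.isSome_none, Option.isSome_some, Bool.not_true, Bool.not_false,
              Bool.false_or, Bool.true_or, Bool.true_and, Bool.and_true] <;>
              split_ifs <;> simp_all <;> omega
  · rw [if_pos hlen, if_pos hlen]
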